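-- pv_equiv track=rewrite | github.com/shivamsinoliyainfinity/Polynomial_restrictor | polynomial_restrictor.py | eval_poly
-- ===== SOURCE A (Python) =====
-- from typing import List, Dict
--
-- def eval_poly(coefficients: List[int], x: Dict[int, int]) -> int:
--     """Evaluates a multilinear polynomial with given coefficients at a given point x."""
--     result = 0
--     for i, c in enumerate(coefficients):
--         term_value = 1
--         for j, v in x.items():
--             if (i >> j) & 1:
--                 term_value *= v
--         result += c * term_value
--     return result % 2
-- ===== SOURCE B (Python) =====
-- from typing import List, Dict
--
-- def eval_poly(coefficients: List[int], x: Dict[int, int]) -> int: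
--     """Evaluates a multilinear polynomial with given coefficients at a given point x (mod 2)."""
--     # A term's product is odd iff no selected factor is even; so mod 2 only the
--     # even-valued variables matter: build a bitmask of them once, then a
--     # coefficient contributes iff its index avoids all those bits.
--     even_mask = 0
--     for j, v in x.items():
--         if v % 2 == 0:
--             even_mask |= 1 << j
--     total = 0
--     for i, c in enumerate(coefficients):
--         if i & even_mask == 0:
--             total += c
--     return total % 2
-- ===== Notes on version B (the rewrite author's own statement) =====
-- stated objective: faster
-- what changed: Instead of computing each term's full product over all variables, B precomputes once a bitmask of the even-valued variables and sums (without any multiplication) exactly the coefficients whose index has no bit in that mask, then reduces mod 2.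
-- outside the precondition, e.g. on eval_poly([], {-3: 4}): A returns 0, B raises ValueError
import Mathlib
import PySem

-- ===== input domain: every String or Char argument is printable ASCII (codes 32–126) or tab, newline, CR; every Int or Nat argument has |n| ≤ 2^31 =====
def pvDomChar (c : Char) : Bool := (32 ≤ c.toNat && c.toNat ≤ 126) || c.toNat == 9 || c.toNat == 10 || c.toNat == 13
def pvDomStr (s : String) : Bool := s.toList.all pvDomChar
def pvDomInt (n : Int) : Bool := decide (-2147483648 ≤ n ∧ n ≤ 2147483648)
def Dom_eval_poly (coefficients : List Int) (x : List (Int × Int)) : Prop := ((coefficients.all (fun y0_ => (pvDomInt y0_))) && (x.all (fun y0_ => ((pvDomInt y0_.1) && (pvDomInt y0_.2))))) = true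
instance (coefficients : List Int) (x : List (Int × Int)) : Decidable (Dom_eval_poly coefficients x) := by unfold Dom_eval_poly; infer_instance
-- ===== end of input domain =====

-- B replaces the per-coefficient product over all variables by a precomputed bitmask of the
-- even-valued variables and a single conditional sum of coefficients (objective: faster, O(n+k) vs O(n*k)).


-- ===== PORT A =====
-- literal port of A: for each (i, c) in enumerate(coefficients), multiply up v for every (j, v)
-- in x with bit j of i set, accumulate c * term_value, return result % 2.
-- i comes from enumerate so i ≥ 0 and i.toNat is exact; j.toNat is exact because Pre_ requires
-- 0 ≤ j (Python raises ValueError on a negative shift count, so those inputs are outside Pre_).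
def eval_poly (coefficients : List Int) (x : List (Int × Int)) : Int :=
  let result := (PySem.List.enumerate coefficients 0).foldl (fun result ic =>
    let term_value := x.foldl (fun t jv =>
      if (ic.1.toNat >>> jv.1.toNat) &&& 1 == 1 then t * jv.2 else t) (1 : Int)
    result + ic.2 * term_value) (0 : Int)
  PySem.Int.mod result 2

-- ===== PORT B =====
-- literal port of Source B: build the bitmask of the even-valued variables once, then sum the
-- coefficients whose index has no bit in that mask, and reduce mod 2.
def eval_poly_alt (coefficients : List Int) (x : List (Int × Int)) : Int :=
  let even_mask := x.foldl (fun m jv =>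
    if PySem.Int.mod jv.2 2 == 0 then m ||| (1 <<< jv.1.toNat) else m) (0 : Nat)
  let total := (PySem.List.enumerate coefficients 0).foldl (fun t ic =>
    if ic.1.toNat &&& even_mask == 0 then t + ic.2 else t) (0 : Int)
  PySem.Int.mod total 2

-- ===== PRECONDITION & SPEC =====
-- Pre_ excludes negative variable indices, on which Python A raises ValueError ('negative shift
-- count') whenever coefficients is nonempty (with empty coefficients A returns 0 before shifting,
-- while B's mask precomputation still raises there), and duplicate variable indices, which a
-- Python dict (A's declared argument type) cannot represent, so the association-list encoding is
-- only faithful without them.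
def Pre_eval_poly (coefficients : List Int) (x : List (Int × Int)) : Prop :=
  (∀ p ∈ x, 0 ≤ p.1) ∧ (x.map Prod.fst).Nodup
instance (coefficients : List Int) (x : List (Int × Int)) : Decidable (Pre_eval_poly coefficients x) := by unfold Pre_eval_poly; infer_instance
def pvWitness_eval_poly : List Int × (List (Int × Int)) := ([3, -2, 5, 7], [(0, 4), (1, -3)])

def Spec_eval_poly (coefficients : List Int) (x : List (Int × Int)) (out : Int) : Prop := out = eval_poly_alt coefficients x
instance (coefficients : List Int) (x : List (Int × Int)) (out : Int) : Decidable (Spec_eval_poly coefficients x out) := by unfold Spec_eval_poly; infer_instance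

-- ===== CLAIM (what is proved, stated in full; the proofs are below) =====
def Claim_equal_eval_poly : Prop := ∀ (coefficients : List Int) (x : List (Int × Int)), Dom_eval_poly coefficients x → Pre_eval_poly coefficients x → Spec_eval_poly coefficients x (eval_poly coefficients x)

-- ===== LEMMAS AND PROOFS =====

-- abbreviation used only by the proofs: B's mask fold with a general start value
def pvMask (x : List (Int × Int)) (m : Nat) : Nat :=
  x.foldl (fun m jv => if PySem.Int.mod jv.2 2 == 0 then m ||| (1 <<< jv.1.toNat) else m) m

theorem pvMask_start (x : List (Int × Int)) (m : Nat) : pvMask x m = m ||| pvMask x 0 := by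
  induction x generalizing m with
  | nil => simp [pvMask]
  | cons jv x ih =>
    simp only [pvMask, List.foldl_cons] at *
    rw [ih]
    conv_rhs => rw [ih]
    split <;> simp [Nat.or_assoc]

theorem pvOr_eq_zero (a b : Nat) : (a ||| b = 0) ↔ (a = 0 ∧ b = 0) := by
  constructor
  · intro h
    exact ⟨Nat.eq_zero_of_le_zero (h ▸ Nat.left_le_or), Nat.eq_zero_of_le_zero (h ▸ Nat.right_le_or)⟩
  · rintro ⟨rfl, rfl⟩; rfl

-- A's inner product fold with a general start value
theorem pvTerm_start (x : List (Int × Int)) (i : Nat) (t : Int) :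
    x.foldl (fun t jv => if (i >>> jv.1.toNat) &&& 1 == 1 then t * jv.2 else t) t
      = t * x.foldl (fun t jv => if (i >>> jv.1.toNat) &&& 1 == 1 then t * jv.2 else t) (1 : Int) := by
  induction x generalizing t with
  | nil => simp
  | cons jv x ih =>
    simp only [List.foldl_cons]
    rw [ih]
    conv_rhs => rw [ih]
    split <;> ring

-- the bit test of the port equals Nat.testBit
theorem pvBit (i n : Nat) : ((i >>> n) &&& 1 == 1) = i.testBit n := by
  simp [Nat.testBit, Nat.and_one_is_mod, Nat.shiftRight_eq_div_pow]

-- parity of A's term product = "index avoids the even mask"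
theorem pvTerm_parity (x : List (Int × Int)) (i : Nat) :
    (x.foldl (fun t jv => if (i >>> jv.1.toNat) &&& 1 == 1 then t * jv.2 else t) (1 : Int)) % 2
      = if i &&& pvMask x 0 = 0 then 1 else 0 := by
  induction x with
  | nil => simp [pvMask]
  | cons jv x ih =>
    simp only [List.foldl_cons]
    rw [pvTerm_start]
    have hmask : pvMask (jv :: x) 0
        = (if PySem.Int.mod jv.2 2 == 0 then 1 <<< jv.1.toNat else 0) ||| pvMask x 0 := by
      rw [show pvMask (jv :: x) 0 = pvMask x (if (PySem.Int.mod jv.2 2 == 0) = true then 0 ||| 1 <<< jv.1.toNat else 0) from rfl, pvMask_start]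
      split <;> simp
    rw [hmask, Nat.and_or_distrib_left]
    simp only [pvOr_eq_zero]
    have hv : PySem.Int.mod jv.2 2 = jv.2 % 2 := PySem.Int.mod_eq_emod_of_pos (by omega)
    by_cases hb : i.testBit jv.1.toNat
    · rw [pvBit, if_pos hb]
      by_cases he : jv.2 % 2 = 0
      · -- even factor: product even, and the mask bit is hit
        have h2 : i &&& (1 <<< jv.1.toNat) ≠ 0 := by
          rw [Nat.one_shiftLeft, Nat.and_two_pow, hb]
          simp
        obtain ⟨k, hk⟩ : ∃ k, jv.2 = 2 * k := ⟨jv.2 / 2, by omega⟩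
        rw [if_neg]
        · have hsplit : 1 * jv.2 * (x.foldl (fun t jv => if (i >>> jv.1.toNat) &&& 1 == 1 then t * jv.2 else t) (1 : Int))
              = 2 * (k * (x.foldl (fun t jv => if (i >>> jv.1.toNat) &&& 1 == 1 then t * jv.2 else t) (1 : Int))) := by
            rw [hk]; ring
          rw [hsplit, Int.mul_emod_right]
        · rintro ⟨h3, -⟩
          rw [hv] at h3
          simp only [he, beq_self_eq_true, if_true] at h3
          exact h2 h3
      · -- odd factor: drops out mod 2, and contributes nothing to the mask
        have h0 : (if (PySem.Int.mod jv.2 2 == 0) = true then 1 <<< jv.1.toNat else 0) = 0 := by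
          rw [hv]; simp [he]
        rw [h0]
        obtain ⟨k, hk⟩ : ∃ k, jv.2 = 2 * k + 1 := ⟨jv.2 / 2, by omega⟩
        have hsplit : 1 * jv.2 * (x.foldl (fun t jv => if (i >>> jv.1.toNat) &&& 1 == 1 then t * jv.2 else t) (1 : Int))
            = (x.foldl (fun t jv => if (i >>> jv.1.toNat) &&& 1 == 1 then t * jv.2 else t) (1 : Int))
              + 2 * (k * (x.foldl (fun t jv => if (i >>> jv.1.toNat) &&& 1 == 1 then t * jv.2 else t) (1 : Int))) := by
          rw [hk]; ring
        rw [hsplit, Int.add_mul_emod_self_left, ih]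
        simp
    · -- bit not set: factor skipped; the mask bit (if any) is not hit by i
      rw [pvBit, if_neg (by simp [hb]), one_mul, ih]
      have h2 : i &&& (if (PySem.Int.mod jv.2 2 == 0) = true then 1 <<< jv.1.toNat else 0) = 0 := by
        split
        · rw [Nat.one_shiftLeft, Nat.and_two_pow]; simp [hb]
        · exact Nat.and_zero i
      rw [h2]
      simp
-- outer fold: summing c * term ≡ conditionally summing c (mod 2)
theorem pvSum_parity (x : List (Int × Int)) (l : List (Int × Int)) (r t : Int)
    (h : r % 2 = t % 2) :
    (l.foldl (fun result ic =>
        result + ic.2 * x.foldl (fun t jv =>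
          if (ic.1.toNat >>> jv.1.toNat) &&& 1 == 1 then t * jv.2 else t) (1 : Int)) r) % 2
      = (l.foldl (fun t ic => if ic.1.toNat &&& pvMask x 0 == 0 then t + ic.2 else t) t) % 2 := by
  induction l generalizing r t with
  | nil => simpa using h
  | cons ic l ih =>
    simp only [List.foldl_cons]
    apply ih
    have hp := pvTerm_parity x ic.1.toNat
    set F := x.foldl (fun t jv =>
      if (ic.1.toNat >>> jv.1.toNat) &&& 1 == 1 then t * jv.2 else t) (1 : Int) with hF
    by_cases hc : ic.1.toNat &&& pvMask x 0 = 0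
    · rw [if_pos hc] at hp
      rw [if_pos (by simpa using hc)]
      obtain ⟨k, hk⟩ : ∃ k, F = 2 * k + 1 := ⟨F / 2, by omega⟩
      rw [hk]
      have : ic.2 * (2 * k + 1) = 2 * (ic.2 * k) + ic.2 := by ring
      rw [this]
      omega
    · rw [if_neg hc] at hp
      rw [if_neg (by simpa using hc)]
      obtain ⟨k, hk⟩ : ∃ k, F = 2 * k := ⟨F / 2, by omega⟩
      rw [hk]
      have : ic.2 * (2 * k) = 2 * (ic.2 * k) := by ring
      rw [this]
      omega

-- ===== VERDICT (by name: the statement is the Claim_ definition above) =====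
theorem eval_poly_spec : Claim_equal_eval_poly := by
  intro coefficients x _ _
  unfold Spec_eval_poly eval_poly eval_poly_alt
  rw [PySem.Int.mod_eq_emod_of_pos (by omega), PySem.Int.mod_eq_emod_of_pos (by omega)]
  exact pvSum_parity x (PySem.List.enumerate coefficients 0) 0 0 rfl
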